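-- pv_equiv track=rewrite | github.com/juanielosegui/td1 | cafetero.py | cafeteros_entre
-- ===== SOURCE A (Python) =====
-- from typing import List
--
-- def filtrarCAFE_BD (texto: str) -> str:
--     ''' Requiere: nada.
--         Devuelve: dado un string s, devolver un
--         nuevo string formado por las letras C, A, F, E, B, o D
--         que aparezcan en s, en el mismo orden de
--         ocurrencia.
--     '''
--     res:str = ('')
--     i:int=0
--     #A
--     while i < len(texto):
--         #B
--         if texto[i] == 'C' or texto[i] == 'A' or texto [i] == 'F' or texto[i] == 'E' or texto[i] == 'B' or texto[i] == 'D':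
--             res = res + texto[i]
--
--         i = i + 1
--         #C
--     #D
--     return res
--
-- def es_cafetero (n:int)->bool:
--     '''Requiere:  n >= 0
--     Devuelve: si n es cafetero (es decir, si y solo si su
--     representacion hexadecimal contiene exactamente una
--     ocurrencia de los símbolos C, A, F y E, en ese orden,
--     y no contiene ocurrencias de los símbolos B y D), True,
--     y si no lo es, False.
--     '''
--     n:str = filtrarCAFE_BD(str(hex(int(n)).upper()))
--     return n == 'CAFE'
--
-- def cafeteros_entre (n:int, m:int) -> (int):
--     '''
--     Requiere: n >= 1, m >= n
--     Devuelve: la lista de números cafeteros entre n y m,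
--     inclusive en ambos casos (es decir, mayores o iguales a n,
--     y menores o iguales a m), ordenada de menor a mayor.
--     '''
--     num: int = n
--     cafeteros: List[int] = []
--
--     while num <= m:
--         if es_cafetero(num) == True:
--             cafeteros.append(num)
--         num = num + 1
--     return cafeteros
-- ===== SOURCE B (Python) =====
-- # B: numeric digit automaton over hex digits (least-significant first), no string building, early exit on a wrong letter.
-- _EXPECT = (14, 15, 10, 12)  # E, F, A, C: the CAFE letters read least-significant first
--
-- def _is_cafe(k: int) -> bool:
--     v = -k if k < 0 else k
--     j = 0
--     while v:
--         d = v & 15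
--         if d >= 10:
--             if j < 4 and d == _EXPECT[j]:
--                 j += 1
--             else:
--                 return False
--         v >>= 4
--     return j == 4
--
-- def cafeteros_entre(n: int, m: int) -> list:
--     return [k for k in range(n, m + 1) if _is_cafe(k)]
-- ===== Notes on version B (the rewrite author's own statement) =====
-- stated objective: faster
-- what changed: Per-number test replaced: instead of formatting hex(k), uppercasing and filtering the string char-by-char then comparing to 'CAFE', B runs a 4-state arithmetic automaton over the hex digits of |k| extracted least-significant-first with shifts/masks, rejecting early on any wrong letter digit.
import Mathlib
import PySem

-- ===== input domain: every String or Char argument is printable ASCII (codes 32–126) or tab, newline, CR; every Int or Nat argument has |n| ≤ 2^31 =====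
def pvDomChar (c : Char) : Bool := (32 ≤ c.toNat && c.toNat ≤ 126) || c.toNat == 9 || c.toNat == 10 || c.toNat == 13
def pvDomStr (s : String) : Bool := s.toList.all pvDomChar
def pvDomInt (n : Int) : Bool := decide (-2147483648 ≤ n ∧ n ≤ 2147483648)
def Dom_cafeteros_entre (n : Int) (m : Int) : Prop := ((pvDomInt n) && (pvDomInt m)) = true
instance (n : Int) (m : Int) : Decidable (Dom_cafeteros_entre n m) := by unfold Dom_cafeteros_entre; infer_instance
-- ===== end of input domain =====

-- B replaces the per-number "format hex, uppercase, filter the string char by char, compare with 'CAFE'" test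
-- by a 4-state arithmetic automaton over the hex digits of |k| taken least-significant first (constant-factor speedup: no string building, early exit).
-- Strings are ported as List Char (PySem.Chars convention).

-- ===== PORT A =====
-- hand port of the uppercase hex digit character (exact: '0'-'9','A'-'F')
def pvHexChar (d : Nat) : Char :=
  ['0','1','2','3','4','5','6','7','8','9','A','B','C','D','E','F'].getD d '*'

-- hand port of the hex digits of v, most significant first (empty for 0)
def pvHexDigits : Nat → List Char
  | v => if h : v = 0 then [] else pvHexDigits (v / 16) ++ [pvHexChar (v % 16)]
  decreasing_by exact Nat.div_lt_self (Nat.pos_of_ne_zero h) (by norm_num)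

-- hand port of str(hex(int(n))).upper(): sign, then '0X', then the digits ('0' for n = 0); exact on all ints
def pyHexUpper (n : Int) : List Char :=
  (if n < 0 then ['-','0','X'] else ['0','X']) ++
    (if n.natAbs = 0 then ['0'] else pvHexDigits n.natAbs)

def filtrarCAFE_BD (texto : List Char) : List Char :=
  texto.foldl
    (fun res c =>
      if c = 'C' ∨ c = 'A' ∨ c = 'F' ∨ c = 'E' ∨ c = 'B' ∨ c = 'D' then res ++ [c] else res)
    []

def es_cafetero (n : Int) : Bool :=
  filtrarCAFE_BD (pyHexUpper n) == ['C','A','F','E']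

def cafeteros_entre (n : Int) (m : Int) : List Int :=
  (PySem.List.pyRange n (m + 1) 1).foldl
    (fun cafeteros num => if es_cafetero num = true then cafeteros ++ [num] else cafeteros) []

-- ===== PORT B =====
def pvExpect : List Nat := [14, 15, 10, 12]  -- E, F, A, C read least-significant first

def pvRunCafe : Nat → Nat → Bool
  | v, j =>
    if h : v = 0 then j == 4
    else
      if 10 ≤ v % 16 then
        if j < 4 && (v % 16 == pvExpect.getD j 0) then pvRunCafe (v / 16) (j + 1) else false
      else pvRunCafe (v / 16) j
  decreasing_by all_goals exact Nat.div_lt_self (Nat.pos_of_ne_zero h) (by norm_num)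

def pvIsCafe (k : Int) : Bool := pvRunCafe k.natAbs 0

def cafeteros_entre_alt (n : Int) (m : Int) : List Int :=
  (PySem.List.pyRange n (m + 1) 1).filter pvIsCafe

-- ===== PRECONDITION & SPEC =====
def Spec_cafeteros_entre (n : Int) (m : Int) (out : List Int) : Prop := out = cafeteros_entre_alt n m
instance (n : Int) (m : Int) (out : List Int) : Decidable (Spec_cafeteros_entre n m out) := by unfold Spec_cafeteros_entre; infer_instance

-- ===== CLAIM (what is proved, stated in full; the proofs are below) =====
def Claim_equal_cafeteros_entre : Prop := ∀ (n : Int) (m : Int), Dom_cafeteros_entre n m → Spec_cafeteros_entre n m (cafeteros_entre n m)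

-- ===== LEMMAS AND PROOFS =====
def gCAFEBD (c : Char) : Bool :=
  decide (c = 'C' ∨ c = 'A' ∨ c = 'F' ∨ c = 'E' ∨ c = 'B' ∨ c = 'D')

-- the letter digits (value ≥ 10) of v, least significant first
def pvLettersLSB : Nat → List Nat
  | v =>
    if h : v = 0 then []
    else if 10 ≤ v % 16 then (v % 16) :: pvLettersLSB (v / 16) else pvLettersLSB (v / 16)
  decreasing_by all_goals exact Nat.div_lt_self (Nat.pos_of_ne_zero h) (by norm_num)

lemma filtrar_eq_filter (texto : List Char) :
    filtrarCAFE_BD texto = texto.filter gCAFEBD := by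
  unfold filtrarCAFE_BD
  rw [PySem.List.foldl_append_ite_eq_filter]
  rfl

lemma hexDigits_zero : pvHexDigits 0 = [] := by rw [pvHexDigits]; rfl

lemma filter_pyHexUpper (n : Int) :
    (pyHexUpper n).filter gCAFEBD = (pvHexDigits n.natAbs).filter gCAFEBD := by
  unfold pyHexUpper
  split_ifs with h1 h2 h3
  · rw [h2, hexDigits_zero]; decide
  · simp [gCAFEBD]
  · rw [h3, hexDigits_zero]; decide
  · simp [gCAFEBD]

lemma gchar (d : Nat) (h : d < 16) : gCAFEBD (pvHexChar d) = decide (10 ≤ d) := by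
  interval_cases d <;> decide

lemma filter_hexDigits (v : Nat) :
    (pvHexDigits v).filter gCAFEBD = ((pvLettersLSB v).map pvHexChar).reverse := by
  induction v using Nat.strong_induction_on with
  | _ v IH =>
    by_cases h0 : v = 0
    · rw [h0, hexDigits_zero, pvLettersLSB]; rfl
    · have hpos : 0 < v := Nat.pos_of_ne_zero h0
      have hlt : v / 16 < v := Nat.div_lt_self hpos (by norm_num)
      have hd16 : v % 16 < 16 := Nat.mod_lt v (by norm_num)
      rw [pvHexDigits, pvLettersLSB, dif_neg h0, dif_neg h0, List.filter_append]
      by_cases hd : 10 ≤ v % 16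
      · simp [hd, gchar _ hd16, IH _ hlt]
      · simp [hd, gchar _ hd16, IH _ hlt]

lemma run_eq (v : Nat) : ∀ j : Nat, j ≤ 4 →
    (pvRunCafe v j = true ↔ pvLettersLSB v = pvExpect.drop j) := by
  induction v using Nat.strong_induction_on with
  | _ v IH =>
    intro j hj
    by_cases h0 : v = 0
    · rw [h0, pvRunCafe, pvLettersLSB]
      interval_cases j <;> simp [pvExpect]
    · have hpos : 0 < v := Nat.pos_of_ne_zero h0
      have hlt : v / 16 < v := Nat.div_lt_self hpos (by norm_num)
      rw [pvRunCafe, pvLettersLSB, dif_neg h0, dif_neg h0]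
      by_cases hd : 10 ≤ v % 16
      · rw [if_pos hd, if_pos hd]
        interval_cases j
        · by_cases h14 : v % 16 = 14
          · simp [pvExpect, h14, IH _ hlt 1 (by omega)]
          · simp [pvExpect, h14]
        · by_cases h15 : v % 16 = 15
          · simp [pvExpect, h15, IH _ hlt 2 (by omega)]
          · simp [pvExpect, h15]
        · by_cases h10 : v % 16 = 10
          · simp [pvExpect, h10, IH _ hlt 3 (by omega)]
          · simp [pvExpect, h10]
        · by_cases h12 : v % 16 = 12
          · simp [pvExpect, h12, IH _ hlt 4 (by omega)]
          · simp [pvExpect, h12]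
        · simp [pvExpect]
      · rw [if_neg hd, if_neg hd]
        exact IH _ hlt j hj

lemma lettersLSB_lt (v : Nat) : ∀ x ∈ pvLettersLSB v, x < 16 := by
  induction v using Nat.strong_induction_on with
  | _ v IH =>
    by_cases h0 : v = 0
    · rw [h0, pvLettersLSB]; simp
    · have hpos : 0 < v := Nat.pos_of_ne_zero h0
      have hlt : v / 16 < v := Nat.div_lt_self hpos (by norm_num)
      rw [pvLettersLSB, dif_neg h0]
      by_cases hd : 10 ≤ v % 16
      · rw [if_pos hd]
        intro x hx
        rcases List.mem_cons.mp hx with h | h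
        · rw [h]; exact Nat.mod_lt v (by norm_num)
        · exact IH _ hlt x h
      · rw [if_neg hd]; exact IH _ hlt

lemma hexChar_inj (a b : Nat) (ha : a < 16) (hb : b < 16) :
    pvHexChar a = pvHexChar b → a = b := by
  interval_cases a <;> interval_cases b <;> decide

lemma map_hexChar_inj : ∀ (l₁ l₂ : List Nat), (∀ x ∈ l₁, x < 16) → (∀ x ∈ l₂, x < 16) →
    l₁.map pvHexChar = l₂.map pvHexChar → l₁ = l₂ := by
  intro l₁
  induction l₁ with
  | nil => intro l₂ _ _ h; cases l₂ with
    | nil => rfl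
    | cons b t => simp at h
  | cons a t ih =>
    intro l₂ h1 h2 h
    cases l₂ with
    | nil => simp at h
    | cons b t2 =>
      simp only [List.map_cons, List.cons.injEq] at h
      have hab : a = b :=
        hexChar_inj a b (h1 a (List.mem_cons_self ..)) (h2 b (List.mem_cons_self ..)) h.1
      have ht : t = t2 :=
        ih t2 (fun x hx => h1 x (List.mem_cons_of_mem _ hx))
          (fun x hx => h2 x (List.mem_cons_of_mem _ hx)) h.2
      rw [hab, ht]

lemma es_eq_is (k : Int) : es_cafetero k = pvIsCafe k := by
  unfold es_cafetero pvIsCafe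
  rw [filtrar_eq_filter, filter_pyHexUpper, filter_hexDigits]
  cases hr : pvRunCafe k.natAbs 0 with
  | true =>
    have hl : pvLettersLSB k.natAbs = pvExpect := by
      simpa [pvExpect] using (run_eq k.natAbs 0 (by omega)).mp hr
    rw [hl]; decide
  | false =>
    have hl : pvLettersLSB k.natAbs ≠ pvExpect := by
      intro h
      have : pvRunCafe k.natAbs 0 = true :=
        (run_eq k.natAbs 0 (by omega)).mpr (by simpa [pvExpect] using h)
      rw [hr] at this; exact absurd this (by simp)
    apply beq_eq_false_iff_ne.mpr
    intro h
    apply hl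
    have hmap : (pvLettersLSB k.natAbs).map pvHexChar = pvExpect.map pvHexChar := by
      have := congrArg List.reverse h
      simpa [pvExpect] using this
    exact map_hexChar_inj _ _ (lettersLSB_lt k.natAbs) (by decide) hmap

-- ===== VERDICT (by name: the statement is the Claim_ definition above) =====
theorem cafeteros_entre_spec : Claim_equal_cafeteros_entre := by
  intro n m _
  unfold Spec_cafeteros_entre cafeteros_entre cafeteros_entre_alt
  rw [PySem.List.foldl_append_ite_eq_filter]
  simp only [List.nil_append]
  apply List.filter_congr
  intro x _
  simp [es_eq_is x]
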